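-- pv_equiv track=rewrite | github.com/apache/superset | requirements/pip-compile-superset.py | compare_requirements
-- ===== SOURCE A (Python) =====
-- def compare_requirements(
--     reqs1: dict[str, str], reqs2: dict[str, str]
-- ) -> tuple[dict[str, str], dict[str, str], dict[str, tuple[str, str]]]:
--     """Compare two sets of requirements and identify differences."""
--     added = {lib: ver for lib, ver in reqs2.items() if lib not in reqs1}
--     removed = {lib: ver for lib, ver in reqs1.items() if lib not in reqs2}
--     version_changed = {
--         lib: (reqs1[lib], reqs2[lib])
--         for lib in reqs1
--         if lib in reqs2 and reqs1[lib] != reqs2[lib]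
--     }
--     return added, removed, version_changed
-- ===== SOURCE B (Python) =====
-- def compare_requirements(
--     reqs1: dict[str, str], reqs2: dict[str, str]
-- ) -> tuple[dict[str, str], dict[str, str], dict[str, tuple[str, str]]]:
--     """Compare two sets of requirements and identify differences."""
--     # Build one merged index: lib -> (version in reqs1 or None, version in reqs2 or None).
--     merged: dict[str, tuple[str | None, str | None]] = {}
--     for lib, ver in reqs1.items():
--         merged[lib] = (ver, None)
--     for lib, ver in reqs2.items():
--         v1 = merged[lib][0] if lib in merged else None
--         merged[lib] = (v1, ver)
--     # Classify every merged entry in one pass; no membership tests against reqs1/reqs2.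
--     added: dict[str, str] = {}
--     removed: dict[str, str] = {}
--     version_changed: dict[str, tuple[str, str]] = {}
--     for lib, (v1, v2) in merged.items():
--         if v1 is None:
--             added[lib] = v2
--         elif v2 is None:
--             removed[lib] = v1
--         elif v1 != v2:
--             version_changed[lib] = (v1, v2)
--     return added, removed, version_changed
-- ===== Notes on version B (the rewrite author's own statement) =====
-- stated objective: alternative
-- what changed: Instead of A's three independent comprehensions over reqs1/reqs2 with membership tests and subscripts, B first builds a single merged index dict lib -> (version-in-reqs1 or None, version-in-reqs2 or None) via two overwrite passes, then classifies every merged entry into added/removed/version_changed in one pass with no lookups into the original dicts.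
import Mathlib
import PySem

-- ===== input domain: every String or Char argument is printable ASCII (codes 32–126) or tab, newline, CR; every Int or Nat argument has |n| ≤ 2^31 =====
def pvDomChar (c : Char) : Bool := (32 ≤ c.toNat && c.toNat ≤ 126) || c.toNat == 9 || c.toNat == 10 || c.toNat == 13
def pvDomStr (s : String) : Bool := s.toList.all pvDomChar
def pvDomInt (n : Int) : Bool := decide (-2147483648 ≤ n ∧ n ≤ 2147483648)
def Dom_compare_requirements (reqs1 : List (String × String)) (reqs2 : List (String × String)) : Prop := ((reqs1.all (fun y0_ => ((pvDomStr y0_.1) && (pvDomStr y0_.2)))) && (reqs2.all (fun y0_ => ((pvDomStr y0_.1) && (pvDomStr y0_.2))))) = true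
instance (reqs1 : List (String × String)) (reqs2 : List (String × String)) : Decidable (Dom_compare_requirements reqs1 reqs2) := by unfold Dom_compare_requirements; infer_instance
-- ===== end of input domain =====

-- B builds one merged index lib -> (version-in-reqs1?, version-in-reqs2?) by two overwrite passes and
-- classifies every merged entry into added/removed/changed in a single pass; objective: alternative.

-- ===== PORT A =====
-- 'lib in d' on a dict
def pyKeyIn (k : String) (d : List (String × String)) : Bool := d.any (fun p => p.1 == k)
-- 'd[lib]' (first match; only evaluated under an 'in' guard in A, so the [] default is unreachable there)
def pyGetItem (d : List (String × String)) (k : String) : String :=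
  match d with
  | [] => ""
  | p :: rest => if p.1 == k then p.2 else pyGetItem rest k

def compare_requirements (reqs1 : List (String × String)) (reqs2 : List (String × String)) : (List (String × String)) × (List (String × String)) × (List (String × String × String)) :=
  let added := reqs2.filter (fun p => !(pyKeyIn p.1 reqs1))
  let removed := reqs1.filter (fun p => !(pyKeyIn p.1 reqs2))
  let version_changed :=
    (reqs1.filter (fun p => pyKeyIn p.1 reqs2 && !(pyGetItem reqs1 p.1 == pyGetItem reqs2 p.1))).map
      (fun p => (p.1, pyGetItem reqs1 p.1, pyGetItem reqs2 p.1))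
  (added, removed, version_changed)

-- ===== PORT B =====
-- 'merged[lib] = v' : dict assignment (overwrite in place, else append)
def dictSet (d : List (String × Option String × Option String)) (k : String)
    (v : Option String × Option String) : List (String × Option String × Option String) :=
  match d with
  | [] => [(k, v)]
  | p :: rest => if p.1 == k then (k, v) :: rest else p :: dictSet rest k v

-- first merge pass: merged[lib] = (ver, None)
def mergeStep1 (m : List (String × Option String × Option String)) (p : String × String) :
    List (String × Option String × Option String) :=
  dictSet m p.1 (some p.2, none)

-- second merge pass: v1 = merged[lib][0] if lib in merged else None; merged[lib] = (v1, ver)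
def mergeStep2 (m : List (String × Option String × Option String)) (p : String × String) :
    List (String × Option String × Option String) :=
  let v1 := match List.lookup p.1 m with
            | some pr => pr.1
            | none => none
  dictSet m p.1 (v1, some p.2)

-- classification pass over merged.items()
def classifyStep
    (acc : List (String × String) × List (String × String) × List (String × String × String))
    (e : String × Option String × Option String) :
    List (String × String) × List (String × String) × List (String × String × String) :=
  match e.2.1 with
  | none => (acc.1 ++ [(e.1, e.2.2.getD "")], acc.2.1, acc.2.2)  -- v1 is None: added (v2 is always set here)
  | some v1 =>
    match e.2.2 with
    | none => (acc.1, acc.2.1 ++ [(e.1, v1)], acc.2.2)           -- v2 is None: removed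
    | some v2 => if v1 == v2 then acc else (acc.1, acc.2.1, acc.2.2 ++ [(e.1, v1, v2)])

def compare_requirements_alt (reqs1 : List (String × String)) (reqs2 : List (String × String)) : (List (String × String)) × (List (String × String)) × (List (String × String × String)) :=
  let m1 := reqs1.foldl mergeStep1 []
  let m2 := reqs2.foldl mergeStep2 m1
  m2.foldl classifyStep ([], [], [])

-- ===== PRECONDITION & SPEC =====
-- Pre_ excludes only association lists with a duplicated key, which never arise from a Python dict
-- (every dict[str, str] argument of A corresponds to a key-nodup list).
def Pre_compare_requirements (reqs1 : List (String × String)) (reqs2 : List (String × String)) : Prop :=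
  (reqs1.map Prod.fst).Nodup ∧ (reqs2.map Prod.fst).Nodup
instance (reqs1 : List (String × String)) (reqs2 : List (String × String)) : Decidable (Pre_compare_requirements reqs1 reqs2) := by unfold Pre_compare_requirements; infer_instance

def pvWitness_compare_requirements : (List (String × String)) × (List (String × String)) :=
  ([("a", "1"), ("b", "2")], [("b", "3"), ("c", "4")])

def Spec_compare_requirements (reqs1 : List (String × String)) (reqs2 : List (String × String)) (out : (List (String × String)) × (List (String × String)) × (List (String × String × String))) : Prop := out = compare_requirements_alt reqs1 reqs2
instance (reqs1 : List (String × String)) (reqs2 : List (String × String)) (out : (List (String × String)) × (List (String × String)) × (List (String × String × String))) : Decidable (Spec_compare_requirements reqs1 reqs2 out) := by unfold Spec_compare_requirements; infer_instance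

-- ===== CLAIM (what is proved, stated in full; the proofs are below) =====
def Claim_equal_compare_requirements : Prop := ∀ (reqs1 : List (String × String)) (reqs2 : List (String × String)), Dom_compare_requirements reqs1 reqs2 → Pre_compare_requirements reqs1 reqs2 → Spec_compare_requirements reqs1 reqs2 (compare_requirements reqs1 reqs2)

-- ===== LEMMAS AND PROOFS =====

-- (helper used in merge2_spec) first-match entry of a merged dict
def pyGetItemM (d : List (String × Option String × Option String)) (k : String) :
    Option String × Option String :=
  match d with
  | [] => (none, none)
  | p :: rest => if p.1 == k then p.2 else pyGetItemM rest k

theorem getItemM_of_mem (d : List (String × Option String × Option String))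
    (h : (d.map Prod.fst).Nodup) (p : String × Option String × Option String) (hp : p ∈ d) :
    pyGetItemM d p.1 = p.2 := by
  induction d with
  | nil => cases hp
  | cons q rest ih =>
    simp only [List.map_cons, List.nodup_cons] at h
    rcases List.mem_cons.mp hp with rfl | hmem
    · simp [pyGetItemM]
    · have hne : ¬ (q.1 == p.1) = true := by
        intro hb
        exact h.1 (by
          have : q.1 = p.1 := by simpa using hb
          rw [this]; exact List.mem_map.mpr ⟨p, hmem, rfl⟩)
      simp [pyGetItemM, hne, ih h.2 hmem]

theorem lookupM_eq (d : List (String × Option String × Option String)) (k : String)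
    (h : k ∈ d.map Prod.fst) :
    List.lookup k d = some (pyGetItemM d k) := by
  induction d with
  | nil => cases h
  | cons q rest ih =>
    by_cases hq : q.1 = k
    · simp [List.lookup, pyGetItemM, hq]
    · simp only [List.map_cons, List.mem_cons] at h
      rcases h with h | h
      · exact absurd h.symm hq
      · have hb : (k == q.1) = false := beq_false_of_ne (fun he => hq he.symm)
        simp [List.lookup, pyGetItemM, beq_false_of_ne hq, hb, ih h]

-- lookup vs. (membership, subscript) on an association list
theorem lookup_eq_if (l : List (String × String)) (k : String) :
    List.lookup k l = if pyKeyIn k l then some (pyGetItem l k) else none := by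
  induction l with
  | nil => simp [pyKeyIn]
  | cons p rest ih =>
    by_cases h : p.1 = k
    · simp [List.lookup, pyKeyIn, pyGetItem, h]
    · have hb : (p.1 == k) = false := beq_false_of_ne h
      simp only [List.lookup, pyKeyIn, pyGetItem, beq_false_of_ne (Ne.symm h), hb, ih,
        List.any_cons, Bool.false_or, Bool.false_eq_true, if_false]
      rfl

-- under nodup keys, the subscript of a member's key returns that member's value
theorem getItem_of_mem (l : List (String × String)) (h : (l.map Prod.fst).Nodup)
    (p : String × String) (hp : p ∈ l) : pyGetItem l p.1 = p.2 := by
  induction l with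
  | nil => cases hp
  | cons q rest ih =>
    simp only [List.map_cons, List.nodup_cons] at h
    rcases List.mem_cons.mp hp with rfl | hmem
    · simp [pyGetItem]
    · have hne : ¬ (q.1 == p.1) = true := by
        intro hb
        exact h.1 (by
          have : q.1 = p.1 := by simpa using hb
          rw [this]; exact List.mem_map.mpr ⟨p, hmem, rfl⟩)
      simp [pyGetItem, hne, ih h.2 hmem]

-- generic lookup-none ↔ key absent, over the merged-entry lists
theorem lookup_none_iff {α : Type} (d : List (String × α)) (k : String) :
    List.lookup k d = none ↔ k ∉ d.map Prod.fst := by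
  induction d with
  | nil => simp
  | cons p rest ih =>
    by_cases h : p.1 = k
    · simp [List.lookup, h]
    · simp [List.lookup, beq_false_of_ne (Ne.symm h), ih, Ne.symm h]

-- a lookup that succeeds on the left part of an append succeeds unchanged
theorem lookup_append_left {α : Type} (d1 d2 : List (String × α)) (k : String) (w : α)
    (h : List.lookup k d1 = some w) : List.lookup k (d1 ++ d2) = some w := by
  induction d1 with
  | nil => cases h
  | cons r rd ihd =>
    by_cases hr : r.1 = k
    · simp_all [List.lookup]
    · have hb : (k == r.1) = false := beq_false_of_ne (fun he => hr he.symm)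
      simp only [List.lookup, hb] at h ⊢
      simp only [List.cons_append, List.lookup, hb]
      exact ihd h

-- dict assignment with a fresh key appends
theorem dictSet_fresh (d : List (String × Option String × Option String)) (k : String)
    (v : Option String × Option String) (h : k ∉ d.map Prod.fst) :
    dictSet d k v = d ++ [(k, v)] := by
  induction d with
  | nil => rfl
  | cons p rest ih =>
    simp only [List.map_cons, List.mem_cons, not_or] at h
    simp [dictSet, beq_false_of_ne (Ne.symm h.1), ih h.2]

-- dict assignment with an existing key, under nodup keys, is a pointwise map
theorem dictSet_mem (d : List (String × Option String × Option String)) (k : String)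
    (v : Option String × Option String) (hnd : (d.map Prod.fst).Nodup)
    (h : k ∈ d.map Prod.fst) :
    dictSet d k v = d.map (fun q => if q.1 = k then (k, v) else q) := by
  induction d with
  | nil => cases h
  | cons p rest ih =>
    simp only [List.map_cons, List.nodup_cons] at hnd
    rcases List.mem_cons.mp h with rfl | hmem
    · have : ∀ q ∈ rest, (if q.1 = p.1 then (p.1, v) else q) = q := by
        intro q hq
        have : q.1 ≠ p.1 := fun he => hnd.1 (he ▸ List.mem_map.mpr ⟨q, hq, rfl⟩)
        simp [this]
      simp [dictSet, List.map_congr_left this]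
    · have hne : p.1 ≠ k := fun he => hnd.1 (he ▸ hmem)
      simp [dictSet, beq_false_of_ne hne, hne, ih hnd.2 hmem]

-- keys are preserved by the pointwise update map
theorem keys_map_update (d : List (String × Option String × Option String)) (k : String)
    (v : Option String × Option String) :
    (d.map (fun q => if q.1 = k then (k, v) else q)).map Prod.fst = d.map Prod.fst := by
  rw [List.map_map]
  apply List.map_congr_left
  intro q _
  by_cases hq : q.1 = k <;> simp [hq]

-- first merge pass appends reqs1 verbatim (fresh keys throughout, by nodup)
theorem merge1_spec (l : List (String × String)) (d : List (String × Option String × Option String))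
    (hl : (l.map Prod.fst).Nodup) (hdisj : ∀ p ∈ l, p.1 ∉ d.map Prod.fst) :
    l.foldl mergeStep1 d = d ++ l.map (fun p => (p.1, some p.2, none)) := by
  induction l generalizing d with
  | nil => simp
  | cons p rest ih =>
    simp only [List.map_cons, List.nodup_cons] at hl
    rw [List.foldl_cons]
    have hstep : mergeStep1 d p = d ++ [(p.1, some p.2, none)] :=
      dictSet_fresh d p.1 _ (hdisj p (List.mem_cons_self ..))
    rw [hstep, ih _ hl.2, List.append_assoc]
    · simp
    · intro q hq
      simp only [List.map_append, List.mem_append]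
      rintro (h | h)
      · exact hdisj q (List.mem_cons_of_mem _ hq) h
      · have : q.1 = p.1 := by simpa using h
        exact hl.1 (this ▸ List.mem_map.mpr ⟨q, hq, rfl⟩)

-- second merge pass: updates the reqs1 part in place, appends the reqs2-only part
theorem merge2_spec (l : List (String × String)) (hl : (l.map Prod.fst).Nodup)
    (d : List (String × Option String × Option String)) (hd : (d.map Prod.fst).Nodup) :
    l.foldl mergeStep2 d =
      d.map (fun q => (q.1, q.2.1,
          match List.lookup q.1 l with | some v => some v | none => q.2.2))
      ++ (l.filter (fun p => (List.lookup p.1 d).isNone)).map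
          (fun p => (p.1, (none : Option String), some p.2)) := by
  induction l generalizing d with
  | nil => simp
  | cons p rest ih =>
    simp only [List.map_cons, List.nodup_cons] at hl
    rw [List.foldl_cons]
    by_cases hk : p.1 ∈ d.map Prod.fst
    · -- existing key: in-place update
      obtain ⟨pr, hlk⟩ : ∃ pr, List.lookup p.1 d = some pr := by
        rcases h : List.lookup p.1 d with _ | pr
        · exact absurd ((lookup_none_iff d p.1).mp h) (not_not_intro hk)
        · exact ⟨pr, rfl⟩
      have hstep : mergeStep2 d p = d.map (fun q => if q.1 = p.1 then (p.1, pr.1, some p.2) else q) := by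
        simp [mergeStep2, hlk, dictSet_mem d p.1 _ hd hk]
      set d' := d.map (fun q => if q.1 = p.1 then (p.1, pr.1, some p.2) else q) with hd'
      have hkeys : d'.map Prod.fst = d.map Prod.fst := keys_map_update d p.1 _
      rw [hstep, ih hl.2 d' (hkeys ▸ hd)]
      congr 1
      · -- mapped parts agree
        rw [hd', List.map_map]
        apply List.map_congr_left
        intro q hq
        by_cases hq1 : q.1 = p.1
        · have hrest : List.lookup p.1 rest = none := (lookup_none_iff rest p.1).mpr hl.1
          -- pr is the entry for p.1 in d, and with nodup keys q is that entry
          have hq2 : pr.1 = q.2.1 := by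
            have : pyGetItemM d q.1 = q.2 := by exact getItemM_of_mem d hd q hq
            rw [hq1] at this
            have : List.lookup p.1 d = some q.2 := by
              rw [← this]; exact lookupM_eq d p.1 hk
            rw [hlk] at this
            simp_all
          simp [Function.comp, hq1, hq2, List.lookup, hrest]
        · have hb : (q.1 == p.1) = false := beq_false_of_ne hq1
          simp [Function.comp, hq1, List.lookup, hb]
      · -- filtered parts agree
        congr 1
        rw [List.filter_cons]
        have : (List.lookup p.1 d).isNone = false := by simp [hlk]
        simp only [this, Bool.false_eq_true]
        apply List.filter_congr
        intro q hq
        have hqne : q.1 ≠ p.1 := fun he => hl.1 (he ▸ List.mem_map.mpr ⟨q, hq, rfl⟩)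
        rcases h1 : List.lookup q.1 d with _ | w
        · have : List.lookup q.1 d' = none := by
            rw [lookup_none_iff] at h1 ⊢; rwa [hkeys]
          simp [this]
        · have : (List.lookup q.1 d').isSome := by
            rcases h2 : List.lookup q.1 d' with _ | w2
            · rw [lookup_none_iff, hkeys, ← lookup_none_iff] at h2; simp_all
            · rfl
          rcases Option.isSome_iff_exists.mp this with ⟨w2, hw2⟩
          simp [hw2]
    · -- fresh key: appended
      have hlk : List.lookup p.1 d = none := (lookup_none_iff d p.1).mpr hk
      have hstep : mergeStep2 d p = d ++ [(p.1, none, some p.2)] := by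
        simp [mergeStep2, hlk, dictSet_fresh d p.1 _ hk]
      have hd2 : ((d ++ [(p.1, (none : Option String), some p.2)]).map Prod.fst).Nodup := by
        simp only [List.map_append, List.nodup_append]
        refine ⟨hd, by simp, ?_⟩
        intro x hx y hy
        simp only [List.map_cons, List.map_nil, List.mem_singleton] at hy
        intro he
        subst hy; subst he
        exact hk hx
      rw [hstep, ih hl.2 _ hd2]
      have hrestp : List.lookup p.1 rest = none := (lookup_none_iff rest p.1).mpr hl.1
      rw [List.map_append, List.filter_cons]
      simp only [hlk, Option.isNone_none, if_pos]
      rw [List.append_assoc]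
      congr 1
      · apply List.map_congr_left
        intro q hq
        have hqne : q.1 ≠ p.1 := fun he => hk (he ▸ List.mem_map.mpr ⟨q, hq, rfl⟩)
        have hb : (q.1 == p.1) = false := beq_false_of_ne hqne
        simp [List.lookup, hb]
      · simp only [List.map_cons, hrestp]
        simp only [List.map_nil, List.cons_append, List.nil_append]
        congr 1
        congr 1
        apply List.filter_congr
        intro q hq
        have hqne : q.1 ≠ p.1 := fun he => hl.1 (he ▸ List.mem_map.mpr ⟨q, hq, rfl⟩)
        rcases h1 : List.lookup q.1 d with _ | w
        · have : List.lookup q.1 (d ++ [(p.1, (none : Option String), some p.2)]) = none := by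
            rw [lookup_none_iff] at h1 ⊢
            simpa [hqne] using h1
          simp [this]
        · have : List.lookup q.1 (d ++ [(p.1, (none : Option String), some p.2)]) = some w :=
            lookup_append_left d _ q.1 w h1
          simp [this]

-- classification of the updated reqs1 part
theorem classify_part1 (l : List (String × String)) (reqs2 : List (String × String))
    (acc : List (String × String) × List (String × String) × List (String × String × String)) :
    (l.map (fun p => (p.1, some p.2,
        match List.lookup p.1 reqs2 with | some v => some v | none => (none : Option String)))).foldl
      classifyStep acc =
      (acc.1,
       acc.2.1 ++ l.filter (fun p => !(pyKeyIn p.1 reqs2)),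
       acc.2.2 ++ (l.filter (fun p => pyKeyIn p.1 reqs2 && !(p.2 == pyGetItem reqs2 p.1))).map
         (fun p => (p.1, p.2, pyGetItem reqs2 p.1))) := by
  induction l generalizing acc with
  | nil => simp
  | cons p rest ih =>
    rw [List.map_cons, List.foldl_cons, List.filter_cons, List.filter_cons]
    by_cases h : pyKeyIn p.1 reqs2
    · rw [lookup_eq_if]
      by_cases he : p.2 = pyGetItem reqs2 p.1
      · have : classifyStep acc (p.1, some p.2, some (pyGetItem reqs2 p.1)) = acc := by
          simp [classifyStep, he]
        simp only [h, if_pos, this, ih]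
        simp [he]
      · have : classifyStep acc (p.1, some p.2, some (pyGetItem reqs2 p.1)) =
            (acc.1, acc.2.1, acc.2.2 ++ [(p.1, p.2, pyGetItem reqs2 p.1)]) := by
          simp [classifyStep, he]
        simp only [h, if_pos, this, ih]
        simp [he]
    · rw [lookup_eq_if]
      have hcs : classifyStep acc (p.1, some p.2, none) = (acc.1, acc.2.1 ++ [(p.1, p.2)], acc.2.2) := by
        simp [classifyStep]
      simp only [h, Bool.false_eq_true, if_false]
      rw [hcs, ih]
      simp

-- classification of the appended reqs2-only part
theorem classify_part2 (l : List (String × String))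
    (acc : List (String × String) × List (String × String) × List (String × String × String)) :
    (l.map (fun p => (p.1, (none : Option String), some p.2))).foldl classifyStep acc =
      (acc.1 ++ l, acc.2.1, acc.2.2) := by
  induction l generalizing acc with
  | nil => simp
  | cons p rest ih =>
    rw [List.map_cons, List.foldl_cons]
    have : classifyStep acc (p.1, none, some p.2) = (acc.1 ++ [p], acc.2.1, acc.2.2) := by
      simp [classifyStep]
    rw [this, ih]
    simp

-- ===== VERDICT (by name: the statement is the Claim_ definition above) =====
theorem compare_requirements_spec : Claim_equal_compare_requirements := by
  intro reqs1 reqs2 _ hpre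
  unfold Spec_compare_requirements compare_requirements compare_requirements_alt
  dsimp only
  rw [merge1_spec reqs1 [] hpre.1 (by simp), List.nil_append,
      merge2_spec reqs2 hpre.2 _ (by simpa [List.map_map, Function.comp] using hpre.1)]
  rw [List.foldl_append, List.map_map]
  have hmap : (fun q => (q.1, q.2.1,
        match List.lookup q.1 reqs2 with | some v => some v | none => q.2.2)) ∘
      (fun p => (p.1, some p.2, (none : Option String))) =
      (fun p : String × String => (p.1, some p.2,
        match List.lookup p.1 reqs2 with | some v => some v | none => (none : Option String))) := by
    funext p; rfl
  rw [hmap, classify_part1]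
  have hfilt : reqs2.filter (fun p =>
      (List.lookup p.1 (reqs1.map fun p => (p.1, some p.2, (none : Option String)))).isNone) =
      reqs2.filter (fun p => !(pyKeyIn p.1 reqs1)) := by
    apply List.filter_congr
    intro q _
    have hkeys : (reqs1.map fun p => (p.1, some p.2, (none : Option String))).map Prod.fst
        = reqs1.map Prod.fst := by
      rw [List.map_map]; rfl
    rcases h3 : List.lookup q.1 (reqs1.map fun p => (p.1, some p.2, (none : Option String))) with _ | w
    · have hnm : q.1 ∉ reqs1.map Prod.fst := by
        rw [← hkeys]; exact (lookup_none_iff _ _).mp h3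
      have hpk : pyKeyIn q.1 reqs1 = false := by
        rcases hp : pyKeyIn q.1 reqs1 with _ | _
        · rfl
        · simp only [pyKeyIn, List.any_eq_true] at hp
          rcases hp with ⟨r, hr, hre⟩
          exact absurd (List.mem_map.mpr ⟨r, hr, by simpa using hre⟩) hnm
      simp [h3, hpk]
    · have hm : q.1 ∈ reqs1.map Prod.fst := by
        by_contra hc
        have := (lookup_none_iff (reqs1.map fun p => (p.1, some p.2, (none : Option String))) q.1).mpr
          (by rw [hkeys]; exact hc)
        rw [h3] at this; cases this
      have hpk : pyKeyIn q.1 reqs1 = true := by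
        rcases List.mem_map.mp hm with ⟨r, hr, hre⟩
        simp only [pyKeyIn, List.any_eq_true]
        exact ⟨r, hr, by simp [hre]⟩
      simp [h3, hpk]
  rw [hfilt, classify_part2]
  have hchg : (reqs1.filter (fun p => pyKeyIn p.1 reqs2 && !(pyGetItem reqs1 p.1 == pyGetItem reqs2 p.1))).map
      (fun p => (p.1, pyGetItem reqs1 p.1, pyGetItem reqs2 p.1)) =
      (reqs1.filter (fun p => pyKeyIn p.1 reqs2 && !(p.2 == pyGetItem reqs2 p.1))).map
      (fun p => (p.1, p.2, pyGetItem reqs2 p.1)) := by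
    rw [List.filter_congr (fun p hp => by rw [getItem_of_mem reqs1 hpre.1 p hp])]
    apply List.map_congr_left
    intro p hp
    rw [getItem_of_mem reqs1 hpre.1 p (List.mem_of_mem_filter hp)]
  simp [hchg]
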